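-- pv_equiv track=rewrite | github.com/JoshTheBlack/Project-Euler-Solutions | 061.py | genHex
-- ===== SOURCE A (Python) =====
-- def calcHex(n):
--     return n*(2*n-1)
--
-- def genHex(x=0):
--     hexs = []
--     while True:
--         x += 1
--         y = calcHex(x)
--         if len(str(y)) < 4: continue
--         if len(str(y)) > 4: break
--         hexs.append(y)
--     return hexs
-- ===== SOURCE B (Python) =====
-- import math
--
-- def calcHex(n):
--     return n*(2*n-1)
--
-- def genHex(x=0):
--     # Indices i with a 4-digit hexagonal value i*(2i-1) form one interval [lo, hi],
--     # whose endpoints come from solving the quadratic 2*i*i - i = N with isqrt.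
--     lo = (1 + math.isqrt(1 + 8 * 1000)) // 4 + 1   # smallest i with calcHex(i) >= 1000
--     hi = (1 + math.isqrt(1 + 8 * 9999)) // 4       # largest  i with calcHex(i) <= 9999
--     return [calcHex(i) for i in range(max(x + 1, lo), hi + 1)]
-- ===== Notes on version B (the rewrite author's own statement) =====
-- stated objective: simpler
-- what changed: B replaces A's scan-and-break loop (testing len(str(y)) every iteration) with closed-form index bounds from the quadratic i*(2i-1)=N via math.isqrt and one direct range comprehension over the positive indices.
-- intended difference: For start indices x <= -24 A's upward scan passes through negative indices, where n*(2n-1) is again four-digit (or already 5-digit, breaking at once), so A returns an accidental negative-index band or []; B returns the four-digit hexagonal numbers at positive indices > x, the intended collection since hexagonal numbers are indexed by positive n. — e.g. on genHex(-73): A returns [], B returns [1035, 1128, 1225, 1326, 1431, 1540, 1653, 1770, 1891, 2016, 2145, 2278, 2415, 2556, 2701, 2850, 3003, 3160, 3321, 3486…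
import Mathlib
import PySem

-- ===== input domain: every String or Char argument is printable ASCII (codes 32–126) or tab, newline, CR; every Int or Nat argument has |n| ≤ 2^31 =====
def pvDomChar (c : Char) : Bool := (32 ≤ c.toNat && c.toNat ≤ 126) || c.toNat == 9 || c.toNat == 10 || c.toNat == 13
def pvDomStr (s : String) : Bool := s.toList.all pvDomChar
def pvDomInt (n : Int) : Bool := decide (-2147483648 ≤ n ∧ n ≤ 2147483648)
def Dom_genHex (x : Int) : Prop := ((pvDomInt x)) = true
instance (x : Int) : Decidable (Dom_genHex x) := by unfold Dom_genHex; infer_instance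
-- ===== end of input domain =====

-- B replaces A's digit-length scan-and-break loop by closed-form index bounds (isqrt of the
-- quadratic discriminant) and one direct range of positive indices; A = B except on x ≤ -24 (D_).

-- ===== PORT A =====
def calcHex (n : Int) : Int := n * (2 * n - 1)

-- The fuel argument only makes the while-loop total: for every Int input the loop's break fires
-- within at most 144 iterations, so the fuel-0 branch is never reached from genHex.
def genHexLoop : Nat → Int → List Int → List Int
  | 0, _, hexs => hexs
  | fuel+1, x, hexs =>
    let x' := x + 1
    let y := calcHex x'
    if PySem.Str.len (PySem.Int.toStr y) < 4 then genHexLoop fuel x' hexs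
    else if 4 < PySem.Str.len (PySem.Int.toStr y) then hexs
    else genHexLoop fuel x' (hexs ++ [y])

def genHex (x : Int) : List Int := genHexLoop 200 x []

-- ===== PORT B =====
def genHex_alt (x : Int) : List Int :=
  let lo := PySem.Int.floordiv (1 + Int.ofNat (Nat.sqrt (1 + 8 * 1000))) 4 + 1
  let hi := PySem.Int.floordiv (1 + Int.ofNat (Nat.sqrt (1 + 8 * 9999))) 4
  (PySem.List.pyRange (max (x + 1) lo) (hi + 1) 1).map calcHex

-- ===== PRECONDITION & SPEC =====
-- For start indices x ≤ -24 A's upward scan begins at negative indices, where n*(2n-1) is again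
-- four-digit (or already 5-digit, breaking at once), so A returns an accidental negative-index band
-- (possibly []); B returns the four-digit hexagonal numbers at positive indices > x, the intended
-- collection since hexagonal numbers are indexed by positive n.
def D_genHex (x : Int) : Prop := x ≤ -24
instance (x : Int) : Decidable (D_genHex x) := by unfold D_genHex; infer_instance

def Spec_genHex (x : Int) (out : List Int) : Prop := ¬ D_genHex x → out = genHex_alt x
instance (x : Int) (out : List Int) : Decidable (Spec_genHex x out) := by unfold Spec_genHex; infer_instance

def pvDiffWitness_genHex : Int := (-73)
def pvDiffWitnessOut_genHex : (List Int) × (List Int) :=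
  ([], [1035, 1128, 1225, 1326, 1431, 1540, 1653, 1770, 1891, 2016, 2145, 2278, 2415, 2556, 2701, 2850, 3003, 3160, 3321, 3486, 3655, 3828, 4005, 4186, 4371, 4560, 4753, 4950, 5151, 5356, 5565, 5778, 5995, 6216, 6441, 6670, 6903, 7140, 7381, 7626, 7875, 8128, 8385, 8646, 8911, 9180, 9453, 9730])

-- ===== CLAIM (what is proved, stated in full; the proofs are below) =====
def Claim_unchanged_genHex : Prop := ∀ (x : Int), Dom_genHex x → Spec_genHex x (genHex x)
def Claim_changed_genHex : Prop := Dom_genHex (pvDiffWitness_genHex) ∧ D_genHex (pvDiffWitness_genHex) ∧ genHex (pvDiffWitness_genHex) = pvDiffWitnessOut_genHex.1 ∧ genHex_alt (pvDiffWitness_genHex) = pvDiffWitnessOut_genHex.2 ∧ pvDiffWitnessOut_genHex.1 ≠ pvDiffWitnessOut_genHex.2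
def Claim_exact_genHex : Prop := ∀ (x : Int), Dom_genHex x → D_genHex x → genHex x ≠ genHex_alt x

-- ===== LEMMAS AND PROOFS =====

-- decimal length of Nat.toDigitsCore (exact, given enough fuel)
lemma toDigitsCore_len (f : Nat) : ∀ (n : Nat) (ds : List Char), n < 10 ^ f → 0 < f →
    (Nat.toDigitsCore 10 f n ds).length = ds.length + Nat.log 10 n + 1 := by
  induction f with
  | zero => intro n ds _ h; omega
  | succ f ih =>
    intro n ds hn _
    simp only [Nat.toDigitsCore]
    by_cases h0 : n / 10 = 0
    · simp only [h0, if_pos, List.length_cons]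
      have : n < 10 := by omega
      rw [Nat.log_eq_zero_iff.mpr (Or.inl this)]
    · rw [if_neg h0]
      have h10 : 10 ≤ n := by
        by_contra h
        exact h0 (Nat.div_eq_of_lt (by omega))
      have hdiv : n / 10 < 10 ^ f := by
        rw [Nat.div_lt_iff_lt_mul (by norm_num)]
        calc n < 10 ^ (f + 1) := hn
          _ = 10 ^ f * 10 := by ring
      have hf : 0 < f := by
        rcases Nat.eq_zero_or_pos f with hf0 | hf0
        · subst hf0; simp at hn; omega
        · exact hf0
      rw [ih (n / 10) _ hdiv hf]
      have hlog : Nat.log 10 n = Nat.log 10 (n / 10) + 1 := by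
        rw [Nat.log_div_base]
        have : 0 < Nat.log 10 n := Nat.log_pos (by norm_num) h10
        omega
      simp only [List.length_cons]
      omega

lemma toDigits_len (n : Nat) : (Nat.toDigits 10 n).length = Nat.log 10 n + 1 := by
  have hn : n < 10 ^ (n + 1) :=
    lt_of_lt_of_le (Nat.lt_pow_self (by norm_num)) (Nat.pow_le_pow_right (by norm_num) (by omega))
  simpa using toDigitsCore_len (n + 1) n [] hn (by omega)

-- digit-length tests of the loop, as numeric bounds (hexagonal values are never negative)
lemma len_lt_iff {y : Int} (hy : 0 ≤ y) : (PySem.Str.len (PySem.Int.toStr y) < 4 ↔ y < 1000) := by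
  rw [PySem.Str.len_eq, PySem.Int.toList_toStr]
  unfold PySem.Int.toChars
  rw [if_neg (by omega), toDigits_len]
  rcases eq_or_ne y.toNat 0 with h0 | h0
  · have hyt := Int.toNat_of_nonneg hy
    have hy0 : y = 0 := by omega
    subst hy0
    rw [show (0 : Int).toNat = 0 from rfl, Nat.log_zero_right]
    norm_num
  · have hlog : 3 ≤ Nat.log 10 y.toNat ↔ 10 ^ 3 ≤ y.toNat := Nat.le_log_iff_pow_le (by norm_num) h0
    have := Int.toNat_of_nonneg hy
    push_cast
    omega

lemma len_gt_iff {y : Int} (hy : 0 ≤ y) : (4 < PySem.Str.len (PySem.Int.toStr y) ↔ 9999 < y) := by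
  rw [PySem.Str.len_eq, PySem.Int.toList_toStr]
  unfold PySem.Int.toChars
  rw [if_neg (by omega), toDigits_len]
  rcases eq_or_ne y.toNat 0 with h0 | h0
  · have hyt := Int.toNat_of_nonneg hy
    have hy0 : y = 0 := by omega
    subst hy0
    rw [show (0 : Int).toNat = 0 from rfl, Nat.log_zero_right]
    norm_num
  · have hlog : 4 ≤ Nat.log 10 y.toNat ↔ 10 ^ 4 ≤ y.toNat := Nat.le_log_iff_pow_le (by norm_num) h0
    have := Int.toNat_of_nonneg hy
    push_cast
    omega

lemma calcHex_nonneg (n : Int) : 0 ≤ calcHex n := by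
  unfold calcHex
  rcases le_or_gt n 0 with h | h
  · nlinarith
  · nlinarith

-- the loop with its string tests replaced by the equivalent numeric bounds
def loopN : Nat → Int → List Int → List Int
  | 0, _, hexs => hexs
  | fuel+1, x, hexs =>
    if calcHex (x + 1) < 1000 then loopN fuel (x + 1) hexs
    else if 9999 < calcHex (x + 1) then hexs
    else loopN fuel (x + 1) (hexs ++ [calcHex (x + 1)])

lemma loop_eq_numeric (fuel : Nat) : ∀ (x : Int) (hexs : List Int),
    genHexLoop fuel x hexs = loopN fuel x hexs := by
  induction fuel with
  | zero => intro x hexs; rfl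
  | succ fuel ih =>
    intro x hexs
    simp only [genHexLoop, loopN]
    rw [if_congr (len_lt_iff (calcHex_nonneg (x + 1))) rfl rfl,
      if_congr (len_gt_iff (calcHex_nonneg (x + 1))) rfl rfl]
    split_ifs with h1 h2
    · exact ih _ _
    · rfl
    · exact ih _ _

-- the first tried index already has a 5-digit value: the loop breaks at once
lemma loop_break (fuel : Nat) (x : Int) (hexs : List Int) (h : 10000 ≤ calcHex (x + 1)) :
    genHexLoop (fuel + 1) x hexs = hexs := by
  rw [loop_eq_numeric]
  simp only [loopN]
  rw [if_neg (by omega), if_pos (by omega)]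

-- B with the bound arithmetic evaluated to its literal values
lemma alt_eq (x : Int) : genHex_alt x = (PySem.List.pyRange (max (x + 1) 23) 71 1).map calcHex := by
  unfold genHex_alt
  norm_num [show Nat.sqrt 8001 = 89 from by norm_num, show Nat.sqrt 79993 = 282 from by norm_num,
    show PySem.Int.floordiv 90 4 = 22 from by decide,
    show PySem.Int.floordiv 283 4 = 70 from by decide]

lemma pyRange_empty {a b : Int} (h : b ≤ a) : PySem.List.pyRange a b 1 = [] := by
  rw [PySem.List.pyRange_one, Int.toNat_eq_zero.mpr (by omega)]
  rfl

-- the finite band -23 ≤ x ≤ 69, checked by evaluation of the numeric loop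
set_option maxRecDepth 10000 in
set_option maxHeartbeats 4000000 in
lemma mid_band : ∀ k ∈ List.range 93,
    loopN 200 (-23 + (k : Int)) [] =
      (PySem.List.pyRange (max ((-23 + (k : Int)) + 1) 23) 71 1).map calcHex := by
  decide

-- inside D_: the finite band -72 ≤ x ≤ -24, where the two results always differ
set_option maxRecDepth 10000 in
set_option maxHeartbeats 4000000 in
lemma exact_band : ∀ k ∈ List.range 49,
    loopN 200 (-72 + (k : Int)) [] ≠
      (PySem.List.pyRange (max ((-72 + (k : Int)) + 1) 23) 71 1).map calcHex := by
  decide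

-- ===== VERDICT (by name: the statement is the Claim_ definition above) =====
theorem genHex_spec : Claim_unchanged_genHex := by
  intro x _ hd
  have hx0 : (-23 : Int) ≤ x := by
    by_contra h
    exact hd (by unfold D_genHex; omega)
  show genHex x = genHex_alt x
  rw [alt_eq]
  rcases le_or_gt x 69 with hhi | hhi
  · -- the finite band -23 ≤ x ≤ 69
    have hk : (x + 23).toNat ∈ List.range 93 := by
      simp only [List.mem_range]; omega
    have hx : x = -23 + ((x + 23).toNat : Int) := by omega
    rw [show genHex x = genHexLoop 200 x [] from rfl, loop_eq_numeric, hx]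
    exact mid_band _ hk
  · -- x ≥ 70: first index x+1 ≥ 71, value ≥ 10011: A breaks at once, B's range is empty
    have hbreak : 10000 ≤ calcHex (x + 1) := by
      unfold calcHex; nlinarith [sq_nonneg (x + 1 - 72)]
    rw [show genHex x = genHexLoop (199 + 1) x [] from rfl, loop_break _ _ _ hbreak,
      max_eq_left (by omega : (23:Int) ≤ x + 1), pyRange_empty (by omega)]
    simp

set_option maxRecDepth 10000 in
set_option maxHeartbeats 4000000 in
theorem genHex_changed : Claim_changed_genHex := by
  unfold Claim_changed_genHex
  simp only [pvDiffWitness_genHex, pvDiffWitnessOut_genHex]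
  refine ⟨by decide, by decide, ?_, ?_, by decide⟩
  · rw [show genHex (-73) = genHexLoop (199 + 1) (-73) [] from rfl,
      loop_break _ _ _ (by decide)]
  · rw [alt_eq]; decide

theorem genHex_tight : Claim_exact_genHex := by
  intro x _ hd
  have hx : x ≤ -24 := hd
  rw [alt_eq]
  rcases le_or_gt x (-73) with hlo | hlo
  · -- x ≤ -73: A breaks at once (value ≥ 10440), B's range 23..70 is nonempty
    have hbreak : 10000 ≤ calcHex (x + 1) := by
      unfold calcHex; nlinarith [sq_nonneg (x + 1 + 72)]
    rw [show genHex x = genHexLoop (199 + 1) x [] from rfl, loop_break _ _ _ hbreak,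
      max_eq_right (by omega : x + 1 ≤ (23 : Int))]
    intro h
    have := congrArg List.length h
    simp [PySem.List.pyRange_one] at this
  · -- the finite band -72 ≤ x ≤ -24
    have hk : (x + 72).toNat ∈ List.range 49 := by
      simp only [List.mem_range]; omega
    have hxx : x = -72 + ((x + 72).toNat : Int) := by omega
    rw [show genHex x = genHexLoop 200 x [] from rfl, loop_eq_numeric, hxx]
    exact exact_band _ hk
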